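-- pv_equiv track=rewrite | github.com/frankxm/Segmentation-d-images-de-documents-anciens-par-reseaux-profonds | doc_functions.py | create_buckets
-- ===== SOURCE A (Python) =====
-- def create_buckets(images_sizes, bin_size):
--     """
--     Group images into same size buckets.
--     :param images_sizes: The sizes of the images.
--     :param bin_size: The step between two buckets.
--     :return bucket: The images indices grouped by size.
--     """
--
--     max_size = max([image_size for image_size in images_sizes.values()])
--     min_size = min([image_size for image_size in images_sizes.values()])
--     # binsize为每个桶的尺寸范围，先创建空桶，每个桶的最大尺寸作为键
--     bucket = {}
--     current = min_size + bin_size - 1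
--     while current < max_size:
--         bucket[current] = []
--         current += bin_size
--     bucket[max_size] = []
--     # 遍历图像尺寸分配到特定桶
--     for index, value in images_sizes.items():
--         # 计算当前尺寸所属的桶的区域，计算上限
--         dict_index = (((value - min_size) // bin_size) + 1) * bin_size + min_size - 1
--         bucket[min(dict_index, max_size)].append(index)
--     # 删除空桶，只保留有图像的桶
--     bucket = {
--         dict_index: values for dict_index, values in bucket.items() if len(values) > 0
--     }
--     return bucket
-- ===== SOURCE B (Python) =====
-- def create_buckets(images_sizes, bin_size):
--     """
--     Group images into same size buckets.
--     Sort (bucket_key, index) pairs by key and slice the sorted list into runs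
--     of equal keys, instead of pre-allocating every bucket over the whole size
--     range and pruning the empty ones afterwards (A).  The key-only stable sort
--     keeps indices of one bucket in their original order.
--     """
--     values = list(images_sizes.values())
--     min_size = min(values)
--     max_size = max(values)
--     pairs = sorted(
--         ((min(((v - min_size) // bin_size + 1) * bin_size + min_size - 1, max_size), i)
--          for i, v in images_sizes.items()),
--         key=lambda p: p[0])
--     bucket = {}
--     pos = 0
--     while pos < len(pairs):
--         key = pairs[pos][0]
--         run = []
--         while pos < len(pairs) and pairs[pos][0] == key:
--             run.append(pairs[pos][1])
--             pos += 1
--         bucket[key] = run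
--     return bucket
-- ===== Notes on version B (the rewrite author's own statement) =====
-- stated objective: alternative
-- what changed: Instead of pre-creating an empty bucket for every key in the whole size range, appending into it and pruning empty buckets afterwards, B builds the list of (bucket_key, index) pairs, sorts it by key with a key-only stable sort, and slices the sorted list into runs of equal keys, so only occurring buckets ever exist.
import Mathlib
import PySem

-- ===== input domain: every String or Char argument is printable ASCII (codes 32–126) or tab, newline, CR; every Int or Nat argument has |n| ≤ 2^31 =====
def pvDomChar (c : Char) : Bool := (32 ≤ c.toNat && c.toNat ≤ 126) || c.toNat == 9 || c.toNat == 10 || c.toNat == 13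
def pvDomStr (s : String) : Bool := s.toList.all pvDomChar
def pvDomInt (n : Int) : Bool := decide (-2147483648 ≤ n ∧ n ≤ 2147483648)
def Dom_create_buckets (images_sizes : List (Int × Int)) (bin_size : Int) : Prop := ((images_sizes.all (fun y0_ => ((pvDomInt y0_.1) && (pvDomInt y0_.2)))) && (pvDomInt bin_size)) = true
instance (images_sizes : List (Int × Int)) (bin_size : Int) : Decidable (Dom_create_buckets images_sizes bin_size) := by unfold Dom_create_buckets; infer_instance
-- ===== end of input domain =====

-- B sorts the (bucket_key, index) pairs by key with a stable sort and slices the sorted list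
-- into runs of equal keys, instead of A's pre-creating every bucket in the whole size range,
-- appending into it and pruning the empty buckets afterwards.

-- ===== PORT A =====
-- dict_index = (((value - min_size) // bin_size) + 1) * bin_size + min_size - 1
def pvKeyCalc (min_size bin_size v : Int) : Int :=
  (PySem.Int.floordiv (v - min_size) bin_size + 1) * bin_size + min_size - 1

-- the keys laid down by A's 'while current < max_size' loop; the '0 < bin_size' conjunct only
-- makes the recursion total (for bin_size ≤ 0 the Python loop never terminates; excluded by Pre_)
def pvWhileKeys (current max_size bin_size : Int) : List Int :=
  if _h : current < max_size ∧ 0 < bin_size then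
    current :: pvWhileKeys (current + bin_size) max_size bin_size
  else []
termination_by (max_size - current).toNat
decreasing_by omega

def create_buckets (images_sizes : List (Int × Int)) (bin_size : Int) : List (Int × List Int) :=
  let d := PySem.Dict.ofList images_sizes
  -- max()/min() of the list comprehensions over values(); ValueError on empty → Pre_
  match PySem.List.max? d.values (fun x => x), PySem.List.min? d.values (fun x => x) with
  | some max_size, some min_size =>
      -- while current < max_size: bucket[current] = []; current += bin_size
      let bucket0 : PySem.Dict Int (List Int) :=
        ((pvWhileKeys (min_size + bin_size - 1) max_size bin_size).foldl
          (fun bu k => bu.insert k []) PySem.Dict.empty).insert max_size []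
      -- for index, value in images_sizes.items(): bucket[min(dict_index, max_size)].append(index)
      -- (bucket[k].append(i) ported as modify with default []; under Pre_ the key is always
      -- present, so a KeyError is impossible there and modify is exact)
      let bucket := d.items.foldl
        (fun bu p => bu.modify (min (pvKeyCalc min_size bin_size p.2) max_size) []
          (fun l => l ++ [p.1])) bucket0
      -- final dict comprehension keeping nonempty values: keys are unique, so it is a filter
      bucket.items.filter (fun p => decide (0 < p.2.length))
  | _, _ => []

-- ===== PORT B =====
-- the inner 'while pos < len(pairs) and pairs[pos][0] == key' loop: collect the run of
-- indices whose key equals `key` and return it with the remaining suffix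
def pvRun (k : Int) : List (Int × Int) → List Int × List (Int × Int)
  | [] => ([], [])
  | p :: rest =>
      if p.1 == k then
        let r := pvRun k rest
        (p.2 :: r.1, r.2)
      else ([], p :: rest)

theorem pvRun_len (k : Int) (l : List (Int × Int)) : (pvRun k l).2.length ≤ l.length := by
  induction l with
  | nil => simp [pvRun]
  | cons p rest ih =>
      simp only [pvRun]
      split
      · simpa using Nat.le_succ_of_le ih
      · simp

-- the outer 'while pos < len(pairs)' loop: slice the sorted pair list into runs
def pvGroup (l : List (Int × Int)) : List (Int × List Int) :=
  match l with
  | [] => []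
  | p :: rest =>
      let r := pvRun p.1 rest
      (p.1, p.2 :: r.1) :: pvGroup r.2
termination_by l.length
decreasing_by
  have := pvRun_len p.1 rest
  simp only [List.length_cons]
  omega

def create_buckets_alt (images_sizes : List (Int × Int)) (bin_size : Int) : List (Int × List Int) :=
  let d := PySem.Dict.ofList images_sizes
  -- min()/max() of values(); ValueError on empty → Pre_
  match PySem.List.min? d.values (fun x => x) with
  | none => []
  | some min_size =>
    match PySem.List.max? d.values (fun x => x) with
    | none => []
    | some max_size =>
      -- pairs = sorted(((min(((v-min_size)//bin_size+1)*bin_size+min_size-1, max_size), i) ...), key=p[0])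
      let pairs := PySem.List.sorted
        (d.items.map (fun p =>
          (min ((PySem.Int.floordiv (p.2 - min_size) bin_size + 1) * bin_size + min_size - 1)
            max_size, p.1)))
        (fun q => q.1) false
      pvGroup pairs

-- ===== PRECONDITION & SPEC =====
-- A raises ValueError (max() of an empty sequence) on an empty dict, and for bin_size ≤ 0 its
-- while loop never terminates; Pre_ excludes exactly those inputs.
def Pre_create_buckets (images_sizes : List (Int × Int)) (bin_size : Int) : Prop :=
  images_sizes ≠ [] ∧ 1 ≤ bin_size
instance (images_sizes : List (Int × Int)) (bin_size : Int) : Decidable (Pre_create_buckets images_sizes bin_size) := by unfold Pre_create_buckets; infer_instance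

def pvWitness_create_buckets : (List (Int × Int)) × Int := ([(0, 5), (1, 12), (2, 6)], 5)

def Spec_create_buckets (images_sizes : List (Int × Int)) (bin_size : Int) (out : List (Int × List Int)) : Prop := out = create_buckets_alt images_sizes bin_size
instance (images_sizes : List (Int × Int)) (bin_size : Int) (out : List (Int × List Int)) : Decidable (Spec_create_buckets images_sizes bin_size out) := by unfold Spec_create_buckets; infer_instance

-- ===== CLAIM (what is proved, stated in full; the proofs are below) =====
def Claim_equal_create_buckets : Prop := ∀ (images_sizes : List (Int × Int)) (bin_size : Int), Dom_create_buckets images_sizes bin_size → Pre_create_buckets images_sizes bin_size → Spec_create_buckets images_sizes bin_size (create_buckets images_sizes bin_size)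

-- ===== LEMMAS AND PROOFS =====

theorem pvWhileKeys_bounds (c M b : Int) : ∀ x ∈ pvWhileKeys c M b, c ≤ x ∧ x < M := by
  rw [pvWhileKeys]
  split
  · rename_i h
    intro x hx
    rcases List.mem_cons.mp hx with rfl | hx
    · exact ⟨le_refl _, h.1⟩
    · have := pvWhileKeys_bounds (c + b) M b x hx
      exact ⟨by omega, this.2⟩
  · simp
termination_by (M - c).toNat
decreasing_by omega

theorem pvWhileKeys_pairwise (c M b : Int) : (pvWhileKeys c M b).Pairwise (· < ·) := by
  rw [pvWhileKeys]
  split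
  · rename_i h
    refine List.Pairwise.cons ?_ (pvWhileKeys_pairwise (c + b) M b)
    intro x hx
    have := pvWhileKeys_bounds (c + b) M b x hx
    omega
  · exact List.Pairwise.nil
termination_by (M - c).toNat
decreasing_by omega

theorem pvWhileKeys_mem (c M b : Int) (hb : 0 < b) (j : Nat) (hlt : c + j * b < M) :
    c + j * b ∈ pvWhileKeys c M b := by
  induction j generalizing c with
  | zero =>
      rw [pvWhileKeys]
      have hc : c < M := by simpa using hlt
      rw [dif_pos ⟨hc, hb⟩]
      simp
  | succ j ih =>
      have hjb : (0:Int) ≤ (j:Int) * b := mul_nonneg (by positivity) (le_of_lt hb)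
      have hcM : c < M := by
        have e : c + ((j:Nat) + 1 : Nat) * b = c + (j:Int) * b + b := by push_cast; ring
        nlinarith [hlt, e]
      rw [pvWhileKeys, dif_pos ⟨hcM, hb⟩]
      have e : c + ((j + 1 : Nat) : Int) * b = (c + b) + (j : Int) * b := by push_cast; ring
      rw [e]
      exact List.mem_cons_of_mem _ (ih (c + b) (by rw [← e]; exact hlt))

theorem pvKey_mem (m M b v : Int) (hb : 0 < b) (hmv : m ≤ v) (_hvM : v ≤ M) :
    min (pvKeyCalc m b v) M ∈ pvWhileKeys (m + b - 1) M b ++ [M] := by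
  set q := PySem.Int.floordiv (v - m) b with hq
  have hq0 : 0 ≤ q := by
    rw [hq, PySem.Int.floordiv_eq_ediv_of_pos hb]
    exact Int.ediv_nonneg (by omega) (by omega)
  have hcalc : pvKeyCalc m b v = (q + 1) * b + m - 1 := rfl
  by_cases hlt : (q + 1) * b + m - 1 < M
  · rw [hcalc, min_eq_left (le_of_lt hlt)]
    apply List.mem_append_left
    have e : (q + 1) * b + m - 1 = (m + b - 1) + (q.toNat : Int) * b := by
      rw [Int.toNat_of_nonneg hq0]; ring
    rw [e]
    exact pvWhileKeys_mem _ _ _ hb q.toNat (by rw [← e]; exact hlt)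
  · rw [hcalc, min_eq_right (by omega)]
    simp

theorem set_update_of_subset {α : Type} [BEq α] [LawfulBEq α] (l : List α) :
    ∀ (s : PySem.Set α), (∀ x ∈ l, x ∈ s) → PySem.Set.update s l = s := by
  induction l with
  | nil => intro s _; rfl
  | cons x t ih =>
      intro s hsub
      have hx : PySem.Set.add s x = s := by
        simp [PySem.Set.add, PySem.Set.contains, hsub x (List.mem_cons_self)]
      show List.foldl PySem.Set.add (PySem.Set.add s x) t = s
      rw [hx]
      exact ih s (fun y hy => hsub y (List.mem_cons_of_mem _ hy))

-- ---- stability of the PySem sort with respect to a key-equality filter ----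

theorem pv_filter_insertBy_ne (x : Int × Int) (acc : List (Int × Int)) (k : Int) (h : x.1 ≠ k) :
    (PySem.List.insertBy (fun a b => decide (a.1 < b.1)) x acc).filter (fun a => a.1 == k)
      = acc.filter (fun a => a.1 == k) := by
  induction acc with
  | nil => simp [PySem.List.insertBy, h]
  | cons y t ih =>
      simp only [PySem.List.insertBy]
      split
      · simp [List.filter_cons, h]
      · simp only [List.filter_cons, ih]

theorem pv_filter_insertBy_eq (x : Int × Int) (acc : List (Int × Int))
    (hs : acc.Pairwise (fun a b => a.1 ≤ b.1)) :
    (PySem.List.insertBy (fun a b => decide (a.1 < b.1)) x acc).filter (fun a => a.1 == x.1)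
      = acc.filter (fun a => a.1 == x.1) ++ [x] := by
  induction acc with
  | nil => simp [PySem.List.insertBy]
  | cons y t ih =>
      rcases List.pairwise_cons.mp hs with ⟨hy, ht⟩
      simp only [PySem.List.insertBy]
      split
      · rename_i hlt
        rw [decide_eq_true_iff] at hlt
        have hnil : (y :: t).filter (fun a => a.1 == x.1) = [] := by
          rw [List.filter_eq_nil_iff]
          intro a ha
          rcases List.mem_cons.mp ha with rfl | ha
          · simp; omega
          · have := hy a ha
            simp; omega
        simp [hnil]
      · simp only [List.filter_cons, ih ht]
        split <;> simp

theorem pv_sorted_append_singleton (xs : List (Int × Int)) (x : Int × Int) :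
    PySem.List.sorted (xs ++ [x]) (fun q => q.1) false
      = PySem.List.insertBy (fun a b => decide (a.1 < b.1)) x
          (PySem.List.sorted xs (fun q => q.1) false) := by
  rw [PySem.List.sorted_eq_foldl_insertBy, PySem.List.sorted_eq_foldl_insertBy,
    List.foldl_append]
  rfl

theorem pv_sorted_filter (xs : List (Int × Int)) (k : Int) :
    (PySem.List.sorted xs (fun q => q.1) false).filter (fun a => a.1 == k)
      = xs.filter (fun a => a.1 == k) := by
  induction xs using List.reverseRecOn with
  | nil => rw [PySem.List.sorted_eq_foldl_insertBy]; rfl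
  | append_singleton xs x ih =>
      rw [pv_sorted_append_singleton]
      by_cases hk : x.1 = k
      · subst hk
        rw [pv_filter_insertBy_eq x _ (PySem.List.sorted_pairwise xs (fun q => q.1)), ih]
        simp [List.filter_append]
      · rw [pv_filter_insertBy_ne x _ k hk, ih]
        simp [List.filter_append, hk]

-- ---- a key-sorted list is determined by its key-equality filters ----

theorem pv_eq_of_filters (X : List (Int × Int)) :
    ∀ (Y : List (Int × Int)), X.Pairwise (fun a b => a.1 ≤ b.1) →
      Y.Pairwise (fun a b => a.1 ≤ b.1) →
      (∀ k, X.filter (fun a => a.1 == k) = Y.filter (fun a => a.1 == k)) → X = Y := by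
  induction X with
  | nil =>
      intro Y _ _ hf
      cases Y with
      | nil => rfl
      | cons y Y' =>
          have := hf y.1
          simp at this
  | cons x X' ih =>
      intro Y hX hY hf
      cases Y with
      | nil =>
          have := hf x.1
          simp at this
      | cons y Y' =>
          rcases List.pairwise_cons.mp hX with ⟨hx, hX'⟩
          rcases List.pairwise_cons.mp hY with ⟨hy, hY'⟩
          have hkey : x.1 = y.1 := by
            by_contra hne
            have h1 := hf x.1
            have h2 := hf y.1
            rw [List.filter_cons_of_pos (by simp), List.filter_cons_of_neg (by simp; omega)] at h1
            rw [List.filter_cons_of_neg (by simp; omega), List.filter_cons_of_pos (by simp)] at h2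
            have hxY : x ∈ Y' := by
              have hm : x ∈ Y'.filter (fun a => a.1 == x.1) := by
                rw [← h1]; exact List.mem_cons_self
              exact (List.mem_filter.mp hm).1
            have hyX : y ∈ X' := by
              have hm : y ∈ X'.filter (fun a => a.1 == y.1) := by
                rw [h2]; exact List.mem_cons_self
              exact (List.mem_filter.mp hm).1
            have := hy x hxY
            have := hx y hyX
            omega
          have hmain := hf x.1
          rw [List.filter_cons_of_pos (by simp), List.filter_cons_of_pos (by simp [hkey])] at hmain
          rw [List.cons_eq_cons] at hmain
          obtain ⟨hxy, htail⟩ := hmain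
          have hrest : ∀ k, X'.filter (fun a => a.1 == k) = Y'.filter (fun a => a.1 == k) := by
            intro k
            by_cases hk : k = x.1
            · subst hk; exact htail
            · have h := hf k
              rw [List.filter_cons_of_neg (by simp; omega),
                List.filter_cons_of_neg (by simp; omega)] at h
              exact h
          rw [hxy, ih Y' hX' hY' hrest]

-- ---- flatten of a grouped list, and pvGroup on it ----

def pvFlatten (L : List (Int × List Int)) : List (Int × Int) :=
  L.flatMap (fun q => q.2.map (fun i => (q.1, i)))

theorem pvFlatten_mem (L : List (Int × List Int)) (p : Int × Int) (hp : p ∈ pvFlatten L) :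
    ∃ q ∈ L, q.1 = p.1 := by
  rw [pvFlatten, List.mem_flatMap] at hp
  obtain ⟨q, hq, hm⟩ := hp
  obtain ⟨i, _, rfl⟩ := List.mem_map.mp hm
  exact ⟨q, hq, rfl⟩

theorem pvFlatten_pairwise (L : List (Int × List Int))
    (h : L.Pairwise (fun a b => a.1 < b.1)) :
    (pvFlatten L).Pairwise (fun a b => a.1 ≤ b.1) := by
  induction L with
  | nil => exact List.Pairwise.nil
  | cons q L' ih =>
      rcases List.pairwise_cons.mp h with ⟨hq, hL'⟩
      show (q.2.map (fun i => (q.1, i)) ++ pvFlatten L').Pairwise (fun a b => a.1 ≤ b.1)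
      rw [List.pairwise_append]
      refine ⟨?_, ih hL', ?_⟩
      · rw [List.pairwise_map]
        exact List.pairwise_of_forall (fun _ _ => le_refl _)
      · intro a ha c hc
        obtain ⟨i, _, rfl⟩ := List.mem_map.mp ha
        obtain ⟨r, hr, hrc⟩ := pvFlatten_mem L' c hc
        have := hq r hr
        simp only
        omega

theorem pvRun_spec (k : Int) (is : List Int) (rest : List (Int × Int))
    (hrest : ∀ p ∈ rest, p.1 ≠ k) :
    pvRun k (is.map (fun i => (k, i)) ++ rest) = (is, rest) := by
  induction is with
  | nil =>
      cases rest with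
      | nil => rfl
      | cons p rest' =>
          have := hrest p List.mem_cons_self
          simp [pvRun, this]
  | cons i is' ih =>
      simp [pvRun, ih]

theorem pvGroup_flatten (L : List (Int × List Int))
    (hpw : L.Pairwise (fun a b => a.1 < b.1)) (hne : ∀ q ∈ L, q.2 ≠ []) :
    pvGroup (pvFlatten L) = L := by
  induction L with
  | nil => rw [show pvFlatten [] = [] from rfl, pvGroup]
  | cons q L' ih =>
      rcases List.pairwise_cons.mp hpw with ⟨hq, hL'⟩
      obtain ⟨k, is⟩ := q
      cases is with
      | nil => exact absurd rfl (hne (k, []) List.mem_cons_self)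
      | cons i is' =>
          have hflat : pvFlatten ((k, i :: is') :: L')
              = (k, i) :: (is'.map (fun j => (k, j)) ++ pvFlatten L') := by
            simp [pvFlatten]
          rw [hflat, pvGroup]
          have hrest : ∀ p ∈ pvFlatten L', p.1 ≠ k := by
            intro p hp
            obtain ⟨r, hr, hrp⟩ := pvFlatten_mem L' p hp
            have := hq r hr
            omega
          rw [pvRun_spec k is' (pvFlatten L') hrest]
          simp only
          rw [ih hL' (fun r hr => hne r (List.mem_cons_of_mem _ hr))]

theorem pv_flatMap_filter_key (ks : List Int) (f : Int → List Int) (k : Int)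
    (hnd : ks.Nodup) :
    (ks.flatMap (fun k' => (f k').map (fun i => (k', i)))).filter (fun a => a.1 == k)
      = if k ∈ ks then (f k).map (fun i => (k, i)) else [] := by
  induction ks with
  | nil => simp
  | cons k0 ks ih =>
      rcases List.nodup_cons.mp hnd with ⟨hk0, hnd'⟩
      rw [List.flatMap_cons, List.filter_append, ih hnd']
      by_cases h0 : k0 = k
      · subst h0
        simp [List.filter_map, Function.comp_def, hk0]
      · simp [List.filter_map, Function.comp_def, h0, Ne.symm h0]

theorem pv_main (items : List (Int × Int)) (m M b : Int) (hb : 0 < b)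
    (hvals : ∀ p ∈ items, m ≤ p.2 ∧ p.2 ≤ M) :
    (items.foldl
        (fun bu p => bu.modify (min (pvKeyCalc m b p.2) M) [] (fun l => l ++ [p.1]))
        (((pvWhileKeys (m + b - 1) M b).foldl
            (fun bu k => bu.insert k []) PySem.Dict.empty).insert M [])).items.filter
      (fun p => decide (0 < p.2.length))
    = pvGroup (PySem.List.sorted
        (items.map (fun p =>
          (min ((PySem.Int.floordiv (p.2 - m) b + 1) * b + m - 1) M, p.1)))
        (fun q => q.1) false) := by
  show _ = pvGroup (PySem.List.sorted
    (items.map (fun p => (min (pvKeyCalc m b p.2) M, p.1))) (fun q => q.1) false)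
  -- names
  set K := pvWhileKeys (m + b - 1) M b with hK
  set allK : List Int := K ++ [M] with hallK
  have hKb := pvWhileKeys_bounds (m + b - 1) M b
  have hKpw := pvWhileKeys_pairwise (m + b - 1) M b
  have hKnd : K.Nodup := hKpw.imp ne_of_lt
  have hMK : M ∉ K := fun h => absurd (hKb M h).2 (lt_irrefl M)
  have hallKpw : allK.Pairwise (· < ·) := by
    rw [hallK, List.pairwise_append]
    refine ⟨hKpw, List.pairwise_singleton _ _, ?_⟩
    intro a ha c hc
    rw [List.mem_singleton] at hc
    subst hc
    exact (hKb a ha).2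
  have hallKnd : allK.Nodup := hallKpw.imp ne_of_lt
  have hkeymem : ∀ v, m ≤ v → v ≤ M → min (pvKeyCalc m b v) M ∈ allK := by
    intro v h1 h2; rw [hallK, hK]; exact pvKey_mem m M b v hb h1 h2
  -- bucket0
  set bucket0 : PySem.Dict Int (List Int) :=
    (K.foldl (fun bu k => bu.insert k []) PySem.Dict.empty).insert M [] with hbucket0
  have h0 : bucket0.items = allK.map (fun k => (k, ([] : List Int))) := by
    have h1 : (K.foldl (fun bu k => bu.insert k ([] : List Int)) PySem.Dict.empty).items
        = K.map (fun k => (k, ([] : List Int))) := by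
      have := PySem.Dict.items_foldl_insert_fresh (ν := List Int) K (fun k => k) (fun _ => [])
        PySem.Dict.empty (fun a _ => rfl) (by simpa using hKnd)
      simpa using this
    have hc : (K.foldl (fun bu k => bu.insert k ([] : List Int)) PySem.Dict.empty).contains M = false := by
      rw [PySem.Dict.contains_eq_decide_mem_keys]
      simp only [PySem.Dict.keys, h1, List.map_map]
      simp [hMK]
    rw [hbucket0, PySem.Dict.items_insert_of_not_contains _ _ hc, h1, hallK]
    simp
  have hkeys0 : bucket0.keys = allK := by
    have e : bucket0.keys = bucket0.items.map (·.1) := rfl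
    rw [e, h0, List.map_map]
    simp [Function.comp_def]
  have hnd0 : bucket0.keys.Nodup := by rw [hkeys0]; exact hallKnd
  have hgetD0 : ∀ k, bucket0.getD k [] = [] := by
    intro k
    by_cases hk : k ∈ allK
    · exact PySem.Dict.getD_of_mem_items _ (by rw [h0]; exact List.mem_map.mpr ⟨k, hk, rfl⟩) hnd0 []
    · refine PySem.Dict.getD_of_not_contains _ _ ?_
      rw [PySem.Dict.contains_eq_decide_mem_keys, hkeys0]
      simp [hk]
  -- the grouping data
  set mapped : List (Int × Int) := items.map (fun p => (min (pvKeyCalc m b p.2) M, p.1)) with hmapped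
  set grp : Int → List Int :=
    fun k => (mapped.filter (fun q => q.1 == k)).map (fun q => q.2) with hgrp
  set occ : List Int := items.map (fun p => min (pvKeyCalc m b p.2) M) with hocc
  have hoccall : ∀ k ∈ occ, k ∈ allK := by
    intro k hk
    rw [hocc] at hk
    obtain ⟨p, hp, rfl⟩ := List.mem_map.mp hk
    exact hkeymem _ (hvals p hp).1 (hvals p hp).2
  have hfoldl : ∀ (d0 : PySem.Dict Int (List Int)),
      items.foldl (fun bu p => bu.modify (min (pvKeyCalc m b p.2) M) [] (fun l => l ++ [p.1])) d0
      = mapped.foldl (fun bu q => bu.modify q.1 [] (fun l => l ++ [q.2])) d0 := by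
    intro d0
    rw [hmapped, List.foldl_map]
  -- A side
  set bucketA := items.foldl
      (fun bu p => bu.modify (min (pvKeyCalc m b p.2) M) [] (fun l => l ++ [p.1])) bucket0 with hbA
  have hkeysA : bucketA.keys = allK := by
    rw [hbA, PySem.Dict.keys_foldl_modify_key items (fun p => min (pvKeyCalc m b p.2) M) []
      (fun _ p => fun l => l ++ [p.1]) bucket0, hkeys0]
    exact set_update_of_subset _ _ hoccall
  have hndA : bucketA.keys.Nodup := by rw [hkeysA]; exact hallKnd
  have hgetDA : ∀ k, bucketA.getD k [] = grp k := by
    intro k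
    rw [hbA, hfoldl, PySem.Dict.getD_foldl_modify_append, hgetD0, hgrp]
    simp
  have hitemsA : bucketA.items = allK.map (fun k => (k, grp k)) := by
    rw [PySem.Dict.items_eq_map_keys bucketA hndA [], hkeysA]
    exact List.map_congr_left (fun k _ => by rw [hgetDA])
  have hfilter : bucketA.items.filter (fun p => decide (0 < p.2.length))
      = (allK.filter (fun k => decide (0 < (grp k).length))).map (fun k => (k, grp k)) := by
    rw [hitemsA, List.filter_map]
    rfl
  rw [hfilter]
  -- the target grouped list
  set L : List (Int × List Int) :=
    (allK.filter (fun k => decide (0 < (grp k).length))).map (fun k => (k, grp k)) with hL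
  have hLpw : L.Pairwise (fun a b => a.1 < b.1) := by
    rw [hL, List.pairwise_map]
    simpa using List.Pairwise.filter _ hallKpw
  have hLne : ∀ q ∈ L, q.2 ≠ [] := by
    intro q hq
    rw [hL] at hq
    obtain ⟨k, hk, rfl⟩ := List.mem_map.mp hq
    have := (List.mem_filter.mp hk).2
    rw [decide_eq_true_iff] at this
    simp only
    exact List.ne_nil_of_length_pos this
  -- flatten of L reproduces every key-filter of mapped
  have hksnd : (allK.filter (fun k => decide (0 < (grp k).length))).Nodup :=
    hallKnd.filter _
  have hflatmap : pvFlatten L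
      = (allK.filter (fun k => decide (0 < (grp k).length))).flatMap
          (fun k => (grp k).map (fun i => (k, i))) := by
    rw [hL, pvFlatten, List.flatMap_map]
  have hLfilter : ∀ k, (pvFlatten L).filter (fun a => a.1 == k)
      = mapped.filter (fun a => a.1 == k) := by
    intro k
    rw [hflatmap, pv_flatMap_filter_key _ _ _ hksnd]
    by_cases hkmem : k ∈ allK.filter (fun k => decide (0 < (grp k).length))
    · rw [if_pos hkmem, hgrp, List.map_map]
      have hcong : ∀ q ∈ mapped.filter (fun q => q.1 == k),
          ((fun i => (k, i)) ∘ (fun q : Int × Int => q.2)) q = q := by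
        intro q hq
        have h := (List.mem_filter.mp hq).2
        rw [beq_iff_eq] at h
        simp [Prod.ext_iff, h]
      rw [List.map_congr_left hcong, List.map_id']
    · rw [if_neg hkmem]
      symm
      rw [List.filter_eq_nil_iff]
      intro a ha hbeq
      rw [beq_iff_eq] at hbeq
      apply hkmem
      refine List.mem_filter.mpr ⟨?_, ?_⟩
      · -- a.1 ∈ allK
        rw [hmapped] at ha
        obtain ⟨p, hp, rfl⟩ := List.mem_map.mp ha
        simp only at hbeq
        rw [← hbeq]
        exact hkeymem _ (hvals p hp).1 (hvals p hp).2
      · rw [decide_eq_true_iff, hgrp]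
        simp only [List.length_map]
        exact List.length_pos_of_mem (List.mem_filter.mpr ⟨ha, by simp [hbeq]⟩)
  -- the stable sort of mapped IS the flattening of L, and pvGroup recovers L from it
  have hsorted_eq : PySem.List.sorted mapped (fun q => q.1) false = pvFlatten L := by
    refine pv_eq_of_filters _ (pvFlatten L)
      (PySem.List.sorted_pairwise mapped (fun q => q.1))
      (pvFlatten_pairwise L hLpw) ?_
    intro k
    rw [pv_sorted_filter, hLfilter]
  rw [hsorted_eq, pvGroup_flatten L hLpw hLne]

theorem create_buckets_spec_aux (images_sizes : List (Int × Int)) (bin_size : Int)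
    (hpre : Pre_create_buckets images_sizes bin_size) :
    create_buckets images_sizes bin_size = create_buckets_alt images_sizes bin_size := by
  obtain ⟨-, hb⟩ := hpre
  have hb0 : (0:Int) < bin_size := by omega
  rw [create_buckets, create_buckets_alt]
  set d := PySem.Dict.ofList images_sizes with hd
  rcases hM : PySem.List.max? d.values (fun x => x) with _ | M
  · rcases hm : PySem.List.min? d.values (fun x => x) with _ | m
    · rfl
    · have hvnil : d.values = [] := (PySem.List.max?_eq_none_iff _ _).mp hM
      have := PySem.List.min?_mem hm
      simp [hvnil] at this
  rcases hm : PySem.List.min? d.values (fun x => x) with _ | m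
  · rfl
  have hvals : ∀ p ∈ d.items, m ≤ p.2 ∧ p.2 ≤ M := by
    intro p hp
    have hv : p.2 ∈ d.values := List.mem_map.mpr ⟨p, hp, rfl⟩
    exact ⟨PySem.List.min?_isMin hm _ hv, PySem.List.max?_isMax hM _ hv⟩
  exact pv_main d.items m M bin_size hb0 hvals

-- ===== VERDICT (by name: the statement is the Claim_ definition above) =====
theorem create_buckets_spec : Claim_equal_create_buckets := by
  intro imgs b _ hpre
  exact create_buckets_spec_aux imgs b hpre
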